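-- pv_equiv track=rewrite | github.com/TwitchPlaysPokemon/pbrEngine | pbrEngine/util.py | stringToBytes
-- ===== SOURCE A (Python) =====
-- def stringToBytes(string, pkmn_name_replacement=False, encode_errors="replace"):
--     '''
--     Helper method to turn a string into a PBR-string.
--     see bytesToString() for more insight.
--     '''
--     data = []
--     previous = None
--     for c in string:
--         if c == "\n":
--             # this is a line break, which is similar to line breaks in https://bulbapedia.bulbagarden.net/wiki/Character_encoding_in_Generation_III
--             data += [0xff, 0xff, 0xff, 0xfe]
--         elif c == ">" and previous == "<" and pkmn_name_replacement:
--             # we use `<>` them in  catchphrases as a placeholder for the Pokemon name.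
--             # remove previous bytes and add control character instead.
--             del data[-2:]
--             data += [0xff, 0xff, 0x00, 0x15]
--         else:
--             b1, b2 = c.encode("utf-16be", errors=encode_errors)
--             data += [b1, b2]
--         previous = c
--     # end with 0, because pbr uses c-strings.
--     data += [0x00, 0x00]
--     return data
-- ===== SOURCE B (Python) =====
-- def stringToBytes(string, pkmn_name_replacement=False, encode_errors="replace"):
--     data = []
--     i = 0
--     n = len(string)
--     while i < n:
--         c = string[i]
--         if c == "\n":
--             data += [0xff, 0xff, 0xff, 0xfe]
--             i += 1
--         elif pkmn_name_replacement and c == "<" and i + 1 < n and string[i + 1] == ">":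
--             data += [0xff, 0xff, 0x00, 0x15]
--             i += 2
--         else:
--             b1, b2 = c.encode("utf-16be", errors=encode_errors)
--             data += [b1, b2]
--             i += 1
--     data += [0x00, 0x00]
--     return data
-- ===== Notes on version B (the rewrite author's own statement) =====
-- stated objective: alternative
-- what changed: Replaces A's for-loop with a `previous`-char state and backtracking `del data[-2:]` on the placeholder pair by an index-driven lookahead loop that peeks at the next character and skips both, never mutating already-emitted bytes.
import Mathlib
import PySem

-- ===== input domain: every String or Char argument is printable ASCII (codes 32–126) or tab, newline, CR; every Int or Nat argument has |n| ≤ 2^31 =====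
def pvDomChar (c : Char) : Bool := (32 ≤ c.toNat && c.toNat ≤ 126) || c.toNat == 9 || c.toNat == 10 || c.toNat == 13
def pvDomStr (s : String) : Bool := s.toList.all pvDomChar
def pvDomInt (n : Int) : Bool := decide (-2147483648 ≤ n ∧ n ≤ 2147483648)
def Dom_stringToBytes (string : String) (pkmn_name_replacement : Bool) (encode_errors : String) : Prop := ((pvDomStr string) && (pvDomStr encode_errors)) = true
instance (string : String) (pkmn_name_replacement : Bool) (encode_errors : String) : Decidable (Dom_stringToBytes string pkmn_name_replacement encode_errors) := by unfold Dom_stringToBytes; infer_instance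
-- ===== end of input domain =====

-- B replaces A's lookbehind (`previous` variable plus `del data[-2:]` backtracking) by an
-- index-driven lookahead loop that never mutates already-emitted bytes; same O(n) cost (objective: alternative).

-- utf-16be encoding of a single BMP char: b1, b2 = c.encode("utf-16be").
-- Exact for every char the domain admits (ASCII/tab/newline/CR); `encode_errors` never fires there.
def pvEnc (c : Char) : List Int := [((c.toNat / 256 : Nat) : Int), ((c.toNat % 256 : Nat) : Int)]

-- ===== PORT A =====
-- for-loop of A: state is (accumulated data, previous char); `del data[-2:]` = take (length - 2)
def pvLoopA (repl : Bool) : List Char → Option Char → List Int → List Int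
  | [], _, data => data ++ [0x00, 0x00]
  | c :: rest, prev, data =>
    if c = '\n' then
      pvLoopA repl rest (some c) (data ++ [0xff, 0xff, 0xff, 0xfe])
    else if c = '>' ∧ prev = some '<' ∧ repl = true then
      pvLoopA repl rest (some c) (data.take (data.length - 2) ++ [0xff, 0xff, 0x00, 0x15])
    else
      pvLoopA repl rest (some c) (data ++ pvEnc c)

def stringToBytes (string : String) (pkmn_name_replacement : Bool) (encode_errors : String) : List Int :=
  pvLoopA pkmn_name_replacement string.toList none []

-- ===== PORT B =====
-- while-loop of B over positions i: lookahead at string[i+1] (head? of the rest), advancing by 2 on "<>"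
def pvGoB (repl : Bool) : List Char → List Int
  | [] => [0x00, 0x00]
  | c :: rest =>
    if c = '\n' then
      [0xff, 0xff, 0xff, 0xfe] ++ pvGoB repl rest
    else if repl = true ∧ c = '<' ∧ rest.head? = some '>' then
      [0xff, 0xff, 0x00, 0x15] ++ pvGoB repl rest.tail
    else
      pvEnc c ++ pvGoB repl rest
termination_by cs => cs.length
decreasing_by
  all_goals (simp [List.length_tail]; try omega)

def stringToBytes_alt (string : String) (pkmn_name_replacement : Bool) (encode_errors : String) : List Int :=
  pvGoB pkmn_name_replacement string.toList

-- ===== PRECONDITION & SPEC =====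
def Spec_stringToBytes (string : String) (pkmn_name_replacement : Bool) (encode_errors : String) (out : List Int) : Prop := out = stringToBytes_alt string pkmn_name_replacement encode_errors
instance (string : String) (pkmn_name_replacement : Bool) (encode_errors : String) (out : List Int) : Decidable (Spec_stringToBytes string pkmn_name_replacement encode_errors out) := by unfold Spec_stringToBytes; infer_instance

-- ===== CLAIM (what is proved, stated in full; the proofs are below) =====
def Claim_equal_stringToBytes : Prop := ∀ (string : String) (pkmn_name_replacement : Bool) (encode_errors : String), Dom_stringToBytes string pkmn_name_replacement encode_errors → Spec_stringToBytes string pkmn_name_replacement encode_errors (stringToBytes string pkmn_name_replacement encode_errors)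

-- ===== LEMMAS AND PROOFS =====

-- Invariant: as long as the replacement case cannot fire at the head, A's stateful loop
-- just appends B's output to the accumulated data.
theorem pvLoopA_eq (repl : Bool) :
    ∀ (n : Nat) (cs : List Char), cs.length ≤ n → ∀ (prev : Option Char) (data : List Int),
      ¬(repl = true ∧ prev = some '<' ∧ cs.head? = some '>') →
      pvLoopA repl cs prev data = data ++ pvGoB repl cs := by
  intro n
  induction n with
  | zero =>
    intro cs hlen prev data _
    have : cs = [] := List.eq_nil_of_length_eq_zero (Nat.le_zero.mp hlen)
    subst this
    simp [pvLoopA, pvGoB]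
  | succ n ih =>
    intro cs hlen prev data hsafe
    match cs with
    | [] => simp [pvLoopA, pvGoB]
    | c :: rest =>
      simp only [List.length_cons, Nat.succ_le_succ_iff] at hlen
      by_cases hnl : c = '\n'
      · subst hnl
        rw [pvLoopA, pvGoB]
        rw [if_pos rfl, if_pos rfl]
        rw [ih rest hlen (some '\n') _ (by rintro ⟨_, h, _⟩; cases h)]
        simp
      · by_cases hrepl : repl = true ∧ c = '<' ∧ rest.head? = some '>'
        · -- B consumes '<' '>' at once; A emits '<' then backtracks over it
          obtain ⟨hr, hc, hh⟩ := hrepl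
          subst hc
          cases rest with
          | nil => simp at hh
          | cons a rest' =>
            have ha : a = '>' := by simpa using hh
            subst ha
            rw [pvLoopA]
            rw [if_neg (by decide : ¬('<' = '\n'))]
            rw [if_neg (by rintro ⟨h, _⟩; exact absurd h (by decide))]
            rw [pvLoopA]
            rw [if_neg (by decide : ¬('>' = '\n'))]
            rw [if_pos ⟨rfl, rfl, hr⟩]
            have htake : ((data ++ pvEnc '<').take ((data ++ pvEnc '<').length - 2)) = data := by
              simp [pvEnc]
            rw [htake]
            have hlen' : rest'.length ≤ n := by
              simp only [List.length_cons] at hlen; omega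
            rw [ih rest' hlen' (some '>') _ (by rintro ⟨_, h, _⟩; cases h)]
            rw [pvGoB]
            rw [if_neg (by decide : ¬('<' = '\n'))]
            rw [if_pos ⟨hr, rfl, rfl⟩]
            simp
        · -- plain character (also '>' not after '<', and '<' not followed by '>')
          rw [pvLoopA, pvGoB]
          rw [if_neg hnl, if_neg hnl]
          rw [if_neg (by rintro ⟨hc, hp, hr⟩; exact hsafe ⟨hr, hp, by rw [hc]; rfl⟩)]
          rw [if_neg hrepl]
          have hnext : ¬(repl = true ∧ some c = some '<' ∧ rest.head? = some '>') := by
            rintro ⟨hr, hp, hh⟩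
            exact hrepl ⟨hr, by injection hp, hh⟩
          rw [ih rest hlen (some c) _ hnext]
          simp

-- ===== VERDICT (by name: the statement is the Claim_ definition above) =====
theorem stringToBytes_spec : Claim_equal_stringToBytes := by
  intro s repl err _
  unfold Spec_stringToBytes stringToBytes stringToBytes_alt
  exact pvLoopA_eq repl s.toList.length s.toList le_rfl none []
    (by rintro ⟨_, h, _⟩; cases h)
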